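-- pv_equiv track=rewrite | github.com/aGolduck/dot-emacs | lisp/hermes-scripts/convert_taskpaper_to_org.py | _detect_code_blocks
-- ===== SOURCE A (Python) =====
-- SQL_KEYWORDS = {'ALTER', 'SELECT', 'CREATE', 'DROP', 'INSERT', 'UPDATE',
--                 'DELETE', 'SET', '--', 'GRANT', 'REVOKE', 'EXPLAIN', 'WITH'}
--
-- def _detect_code_blocks(notes: list[str]) -> list[str]:
--     """Wrap consecutive SQL-like lines in #+begin_src sql blocks."""
--     result = []
--     in_code = False
--     for line in notes:
--         words = line.strip().split()
--         first = words[0].upper().rstrip(';') if words else ''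
--         is_sql = first in SQL_KEYWORDS
--         if is_sql and not in_code:
--             result.append('#+begin_src sql')
--             in_code = True
--         elif not is_sql and in_code and line.strip():
--             result.append('#+end_src')
--             in_code = False
--         result.append(line)
--     if in_code:
--         result.append('#+end_src')
--     return result
-- ===== SOURCE B (Python) =====
-- SQL_KEYWORDS = {'ALTER', 'SELECT', 'CREATE', 'DROP', 'INSERT', 'UPDATE',
--                 'DELETE', 'SET', '--', 'GRANT', 'REVOKE', 'EXPLAIN', 'WITH'}
--
--
-- def _kind(line):
--     words = line.strip().split()
--     if words and words[0].upper().rstrip(';') in SQL_KEYWORDS: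
--         return 'sql'
--     if not line.strip():
--         return 'blank'
--     return 'other'
--
--
-- def _detect_code_blocks(notes: list[str]) -> list[str]:
--     """Wrap consecutive SQL-like lines in #+begin_src sql blocks."""
--     out = []
--     i, n = 0, len(notes)
--     while i < n:
--         if _kind(notes[i]) == 'sql':
--             # a code region: runs through following sql and blank lines,
--             # closing before the first other line (or at end of input)
--             j = i + 1
--             while j < n and _kind(notes[j]) != 'other':
--                 j += 1
--             out.append('#+begin_src sql')
--             out.extend(notes[i:j])
--             out.append('#+end_src')
--             i = j
--         else:
--             out.append(notes[i])
--             i += 1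
--     return out
-- ===== Notes on version B (the rewrite author's own statement) =====
-- stated objective: alternative
-- what changed: Replaces A's single pass with an in_code boolean flag by a region scan: classify each line (sql/blank/other) and emit each maximal SQL-started run (extending through sql and blank lines) as one wrapped block via an inner scan.
import Mathlib
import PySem

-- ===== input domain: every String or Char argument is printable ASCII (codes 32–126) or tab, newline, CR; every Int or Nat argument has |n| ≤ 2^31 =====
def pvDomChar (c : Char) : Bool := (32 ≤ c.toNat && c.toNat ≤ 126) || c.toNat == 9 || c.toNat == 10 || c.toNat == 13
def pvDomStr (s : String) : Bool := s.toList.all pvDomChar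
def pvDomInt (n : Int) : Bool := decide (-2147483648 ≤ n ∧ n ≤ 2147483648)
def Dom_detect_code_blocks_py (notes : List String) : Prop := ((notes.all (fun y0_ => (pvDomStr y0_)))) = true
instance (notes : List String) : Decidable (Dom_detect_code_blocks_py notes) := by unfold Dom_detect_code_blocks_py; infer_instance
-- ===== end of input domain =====

-- B replaces A's line-by-line in_code state machine by a region scan: each maximal
-- SQL-started run (through following sql/blank lines) is emitted as one wrapped block
-- (objective: alternative decomposition, same cost).

def sqlKeywords : List String :=
  ["ALTER", "SELECT", "CREATE", "DROP", "INSERT", "UPDATE",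
   "DELETE", "SET", "--", "GRANT", "REVOKE", "EXPLAIN", "WITH"]

-- exact port of str.rstrip(';'): remove all trailing ';' characters
def rstripSemis (s : String) : String :=
  String.ofList ((s.toList.reverse.dropWhile (· == ';')).reverse)

-- ===== PORT A =====
def aLoop : List String → List String → Bool → List String × Bool
  | [], result, in_code => (result, in_code)
  | line :: rest, result, in_code =>
    let words := PySem.Str.split₀ (PySem.Str.strip line)
    let first := match words with
      | [] => ""
      | w :: _ => rstripSemis (PySem.Str.upper w)
    let is_sql := sqlKeywords.contains first
    if is_sql && !in_code then
      aLoop rest (result ++ ["#+begin_src sql", line]) true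
    else if !is_sql && in_code && !(PySem.Str.strip line == "") then
      aLoop rest (result ++ ["#+end_src", line]) false
    else
      aLoop rest (result ++ [line]) in_code

def detect_code_blocks_py (notes : List String) : List String :=
  let r := aLoop notes [] false
  if r.2 then r.1 ++ ["#+end_src"] else r.1

-- ===== PORT B =====
inductive LKind | sql | blank | other
deriving DecidableEq, Repr

def kindOf (line : String) : LKind :=
  let words := PySem.Str.split₀ (PySem.Str.strip line)
  if (match words with
      | [] => false
      | w :: _ => sqlKeywords.contains (rstripSemis (PySem.Str.upper w))) then .sql
  else if PySem.Str.strip line == "" then .blank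
  else .other

def notOther (line : String) : Bool := decide (kindOf line ≠ .other)

def goB : List String → List String
  | [] => []
  | l :: rest =>
    if kindOf l = .sql then
      "#+begin_src sql" :: l ::
        (List.takeWhile notOther rest ++ "#+end_src" :: goB (List.dropWhile notOther rest))
    else
      l :: goB rest
termination_by l => l.length
decreasing_by
· have := List.length_dropWhile_le notOther rest; simp; omega
· simp

def detect_code_blocks_py_alt (notes : List String) : List String := goB notes

-- ===== PRECONDITION & SPEC =====
def Spec_detect_code_blocks_py (notes : List String) (out : List String) : Prop := out = detect_code_blocks_py_alt notes
instance (notes : List String) (out : List String) : Decidable (Spec_detect_code_blocks_py notes out) := by unfold Spec_detect_code_blocks_py; infer_instance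

-- ===== CLAIM (what is proved, stated in full; the proofs are below) =====
def Claim_equal_detect_code_blocks_py : Prop := ∀ (notes : List String), Dom_detect_code_blocks_py notes → Spec_detect_code_blocks_py notes (detect_code_blocks_py notes)

-- ===== LEMMAS AND PROOFS =====

def finishA (notes : List String) (res : List String) (b : Bool) : List String :=
  let r := aLoop notes res b
  if r.2 then r.1 ++ ["#+end_src"] else r.1

theorem kind_sql_iff (l : String) :
    (kindOf l = LKind.sql) ↔
      sqlKeywords.contains (match PySem.Str.split₀ (PySem.Str.strip l) with
        | [] => ""
        | w :: _ => rstripSemis (PySem.Str.upper w)) = true := by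
  unfold kindOf
  cases h : PySem.Str.split₀ (PySem.Str.strip l) with
  | nil =>
    have he : sqlKeywords.contains "" = false := by decide
    simp only [he]
    rw [if_neg (by simp)]
    constructor
    · intro h'; exfalso; revert h'; split <;> simp
    · intro h'; exact absurd h' (by simp)
  | cons w ws =>
    cases hw : sqlKeywords.contains (rstripSemis (PySem.Str.upper w)) with
    | true => simp only [hw, if_true]
    | false =>
      simp only [hw, Bool.false_eq_true, if_false]
      constructor
      · intro h'; exfalso; revert h'; split <;> simp
      · intro h'; exact absurd h' (by simp)

theorem kind_not_sql (l : String)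
    (hc : sqlKeywords.contains (match PySem.Str.split₀ (PySem.Str.strip l) with
        | [] => ""
        | w :: _ => rstripSemis (PySem.Str.upper w)) = false) :
    kindOf l = (if PySem.Str.strip l == "" then LKind.blank else LKind.other) := by
  unfold kindOf
  cases h : PySem.Str.split₀ (PySem.Str.strip l) with
  | nil => simp
  | cons w ws =>
    rw [h] at hc
    simp only at hc
    simp only [hc, Bool.false_eq_true, if_false]

theorem main_invariant (notes : List String) : ∀ res,
    finishA notes res false = res ++ goB notes ∧
    finishA notes res true =
      res ++ List.takeWhile notOther notes ++ "#+end_src" :: goB (List.dropWhile notOther notes) := by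
  induction notes with
  | nil => intro res; constructor <;> simp [finishA, aLoop, goB]
  | cons l rest ih =>
    intro res
    cases hc : sqlKeywords.contains (match PySem.Str.split₀ (PySem.Str.strip l) with
        | [] => ""
        | w :: _ => rstripSemis (PySem.Str.upper w)) with
    | true =>
      have hk : kindOf l = LKind.sql := (kind_sql_iff l).2 hc
      have hno : notOther l = true := by simp [notOther, hk]
      constructor
      · have h2 := (ih (res ++ ["#+begin_src sql", l])).2
        simp only [finishA, aLoop, hc] at *
        simp [goB, hk, h2]
      · have h2 := (ih (res ++ [l])).2
        simp only [finishA, aLoop, hc] at *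
        simp [hno, h2]
    | false =>
      have hk := kind_not_sql l hc
      constructor
      · have h1 := (ih (res ++ [l])).1
        simp only [finishA, aLoop, hc] at *
        have hns : kindOf l ≠ LKind.sql := by rw [hk]; split <;> simp
        simp [goB, hns, h1]
      · by_cases hb : PySem.Str.strip l == ""
        · have hkb : kindOf l = LKind.blank := by rw [hk, if_pos hb]
          have hno : notOther l = true := by simp [notOther, hkb]
          have h2 := (ih (res ++ [l])).2
          simp only [finishA, aLoop, hc, hb] at *
          simp [hno, h2]
        · have hko : kindOf l = LKind.other := by rw [hk, if_neg hb]
          have hno : notOther l = false := by simp [notOther, hko]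
          have hns : kindOf l ≠ LKind.sql := by simp [hko]
          have h1 := (ih (res ++ ["#+end_src", l])).1
          simp only [finishA, aLoop, hc, hb] at *
          simp [hno, goB, hns, h1]

-- ===== VERDICT (by name: the statement is the Claim_ definition above) =====
theorem detect_code_blocks_py_spec : Claim_equal_detect_code_blocks_py := by
  intro notes _
  unfold Spec_detect_code_blocks_py detect_code_blocks_py detect_code_blocks_py_alt
  have h := (main_invariant notes []).1
  simpa [finishA] using h
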